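-- pv_equiv track=rewrite | github.com/Druneau/aoc2023 | day3/part2.py | validGearPart
-- ===== SOURCE A (Python) =====
-- from itertools import groupby
-- from operator import itemgetter
--
-- def IdxDigits(line):
--     digitIndices = [pos for pos, char in enumerate(line) if char.isdigit()]
--
--     # group masked digit indices into actual part numbers (consecutive digits as lists)
--     groups = []
--     for k, g in groupby(enumerate(digitIndices), lambda i_x: i_x[0] - i_x[1]):
--         groups.append(list(map(itemgetter(1), g)))
--     return groups
--
-- def getGearNumber(line, digits):
--     n = ''
--     for i in digits:
--         n += line[i]
--     return int(n)
--
-- def validGearPart(line, sB, sC, sA, lineNumber):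
--
--     digits = IdxDigits(line)
--
--     # build a list of parts that touch a gear (star) while keeping reference
--     # to which exact gear (line number and index)
--     parts = []
--     for g in sB:
--         for d in digits:
--             if any(x in [g-1, g, g+1] for x in d):
--                 parts.append(
--                     (str(g) + '-' + str(lineNumber-1), (getGearNumber(line, d), lineNumber)))
--     for g in sC:
--         for d in digits:
--             if any(x in [g-1, g, g+1] for x in d):
--                 parts.append((str(g) + '-' + str(lineNumber),
--                              (getGearNumber(line, d), lineNumber)))
--     for g in sA:
--         for d in digits:
--             if any(x in [g-1, g, g+1] for x in d):
--                 parts.append(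
--                     (str(g) + '-' + str(lineNumber+1), (getGearNumber(line, d), lineNumber)))
--
--     return parts
--
-- lineNumber = 0
-- ===== SOURCE B (Python) =====
-- def validGearPart(line, sB, sC, sA, lineNumber):
--     # One scan over the line: collect each maximal digit run as (start, end, value),
--     # accumulating the value arithmetically; then a gear g touches a run iff
--     # start - 1 <= g <= end + 1 (interval overlap), no per-digit membership scan.
--     runs = []
--     start = None
--     val = 0
--     for i, ch in enumerate(line):
--         if ch.isdigit():
--             if start is None:
--                 start = i
--                 val = 0
--             val = val * 10 + (ord(ch) - 48)
--         else:
--             if start is not None: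
--                 runs.append((start, i - 1, val))
--                 start = None
--     if start is not None:
--         runs.append((start, len(line) - 1, val))
--
--     parts = []
--     for offset, gears in ((-1, sB), (0, sC), (1, sA)):
--         for g in gears:
--             for s, e, v in runs:
--                 if s - 1 <= g <= e + 1:
--                     parts.append(("%d-%d" % (g, lineNumber + offset), (v, lineNumber)))
--     return parts
-- ===== Notes on version B (the rewrite author's own statement) =====
-- stated objective: alternative
-- what changed: A filters digit indices, regroups them with itertools.groupby, and for every gear scans each group's index list for membership in {g-1,g,g+1} and re-builds the number from the line on every hit; B makes one scan over the line collecting each digit run as (start, end, value) with the value accumulated arithmetically, then tests each gear against each run with a single interval comparison.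
import Mathlib
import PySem

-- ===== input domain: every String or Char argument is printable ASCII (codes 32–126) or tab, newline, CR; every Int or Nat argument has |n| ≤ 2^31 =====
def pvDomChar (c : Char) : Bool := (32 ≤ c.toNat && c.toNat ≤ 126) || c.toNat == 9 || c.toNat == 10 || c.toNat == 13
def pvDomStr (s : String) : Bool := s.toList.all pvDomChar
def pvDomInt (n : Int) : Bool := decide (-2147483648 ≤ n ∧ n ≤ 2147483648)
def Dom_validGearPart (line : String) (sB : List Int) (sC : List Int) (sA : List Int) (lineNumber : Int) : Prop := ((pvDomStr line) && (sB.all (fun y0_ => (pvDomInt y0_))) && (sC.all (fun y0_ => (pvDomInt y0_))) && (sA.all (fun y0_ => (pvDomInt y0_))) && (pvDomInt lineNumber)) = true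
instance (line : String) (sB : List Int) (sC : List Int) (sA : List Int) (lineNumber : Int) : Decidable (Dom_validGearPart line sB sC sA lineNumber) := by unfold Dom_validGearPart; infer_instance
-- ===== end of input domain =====

-- B replaces A's groupby-of-digit-indices plus per-gear membership scans by one left-to-right scan
-- collecting each digit run as (start, end, value) and an interval test per gear (alternative decomposition).

-- ===== PORT A =====

-- itertools.groupby over enumerate(digitIndices) with key i - x: current key, current group (reversed)
def pyIdxDigitsGroup (curKey : Int) (cur : List Int) : List (Int × Int) → List (List Int)
  | [] => [cur.reverse]
  | (i, x) :: rest =>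
    if i - x = curKey then pyIdxDigitsGroup curKey (x :: cur) rest
    else cur.reverse :: pyIdxDigitsGroup (i - x) [x] rest

def pyIdxDigits (line : List Char) : List (List Int) :=
  let digitIndices := ((PySem.List.enumerate line 0).filter (fun p => PySem.Chars.isdigit p.2)).map (fun p => p.1)
  match PySem.List.enumerate digitIndices 0 with
  | [] => []
  | (i, x) :: rest => pyIdxDigitsGroup (i - x) [x] rest

-- int(n) ported by hand (exact here): n is by construction a nonempty string of ASCII digits,
-- on which Python's int() is exactly this base-10 fold.
def pyIntOfDigits (n : List Char) : Int :=
  n.foldl (fun a c => a * 10 + ((c.toNat : Int) - 48)) 0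

def pyGetGearNumber (line : List Char) (digits : List Int) : Int :=
  let n := digits.foldl (fun n i =>
    n ++ (match PySem.List.pyGet? line i with | some c => [c] | none => [])) ([] : List Char)
  pyIntOfDigits n

-- one of A's three 'for g in …: for d in digits: …' loops (gearLine = the line number put in the label)
def pyGearLoop (line : List Char) (digits : List (List Int)) (gearLine : Int) (lineNumber : Int)
    (gears : List Int) (parts : List (String × (Int × Int))) : List (String × (Int × Int)) :=
  gears.foldl (fun parts g =>
    digits.foldl (fun parts d =>
      if d.any (fun x => x == g - 1 || x == g || x == g + 1) then
        parts ++ [(PySem.Int.toStr g ++ "-" ++ PySem.Int.toStr gearLine, (pyGetGearNumber line d, lineNumber))]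
      else parts) parts) parts

def validGearPart (line : String) (sB : List Int) (sC : List Int) (sA : List Int) (lineNumber : Int) : List (String × (Int × Int)) :=
  let cs := line.toList
  let digits := pyIdxDigits cs
  let parts := pyGearLoop cs digits (lineNumber - 1) lineNumber sB []
  let parts := pyGearLoop cs digits lineNumber lineNumber sC parts
  pyGearLoop cs digits (lineNumber + 1) lineNumber sA parts

-- ===== PORT B =====

-- Source B's loop body: state = (runs, start, val)
def altStep (st : List (Int × Int × Int) × Option Int × Int) (p : Int × Char) :
    List (Int × Int × Int) × Option Int × Int :=
  let (runs, start, val) := st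
  if PySem.Chars.isdigit p.2 then
    match start with
    | none => (runs, some p.1, 0 * 10 + ((p.2.toNat : Int) - 48))
    | some s => (runs, some s, val * 10 + ((p.2.toNat : Int) - 48))
  else
    match start with
    | some s => (runs ++ [(s, p.1 - 1, val)], none, val)
    | none => (runs, none, val)

def altRuns (cs : List Char) : List (Int × Int × Int) :=
  let st := (PySem.List.enumerate cs 0).foldl altStep ([], none, 0)
  match st.2.1 with
  | some s => st.1 ++ [(s, (cs.length : Int) - 1, st.2.2)]
  | none => st.1

def altGearLoop (runs : List (Int × Int × Int)) (gearLine : Int) (lineNumber : Int)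
    (gears : List Int) (parts : List (String × (Int × Int))) : List (String × (Int × Int)) :=
  gears.foldl (fun parts g =>
    runs.foldl (fun parts r =>
      if r.1 - 1 ≤ g ∧ g ≤ r.2.1 + 1 then
        parts ++ [(PySem.Int.toStr g ++ "-" ++ PySem.Int.toStr gearLine, (r.2.2, lineNumber))]
      else parts) parts) parts

def validGearPart_alt (line : String) (sB : List Int) (sC : List Int) (sA : List Int) (lineNumber : Int) : List (String × (Int × Int)) :=
  let runs := altRuns line.toList
  let parts := altGearLoop runs (lineNumber - 1) lineNumber sB []
  let parts := altGearLoop runs lineNumber lineNumber sC parts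
  altGearLoop runs (lineNumber + 1) lineNumber sA parts

-- ===== PRECONDITION & SPEC =====
def Spec_validGearPart (line : String) (sB : List Int) (sC : List Int) (sA : List Int) (lineNumber : Int) (out : List (String × (Int × Int))) : Prop := out = validGearPart_alt line sB sC sA lineNumber
instance (line : String) (sB : List Int) (sC : List Int) (sA : List Int) (lineNumber : Int) (out : List (String × (Int × Int))) : Decidable (Spec_validGearPart line sB sC sA lineNumber out) := by unfold Spec_validGearPart; infer_instance

-- ===== CLAIM (what is proved, stated in full; the proofs are below) =====
def Claim_equal_validGearPart : Prop := ∀ (line : String) (sB : List Int) (sC : List Int) (sA : List Int) (lineNumber : Int), Dom_validGearPart line sB sC sA lineNumber → Spec_validGearPart line sB sC sA lineNumber (validGearPart line sB sC sA lineNumber)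

-- ===== LEMMAS AND PROOFS =====

-- reference runs: (start, end, value) of the maximal digit runs, by structural recursion
mutual
  def refRuns1 : List Char → Int → Int → (Int × Int) × List (Int × Int × Int)
    | [], i, v => ((i - 1, v), [])
    | c :: cs, i, v =>
      if PySem.Chars.isdigit c then refRuns1 cs (i + 1) (v * 10 + ((c.toNat : Int) - 48))
      else ((i - 1, v), refRuns cs (i + 1))
  def refRuns : List Char → Int → List (Int × Int × Int)
    | [], _ => []
    | c :: cs, i =>
      if PySem.Chars.isdigit c then
        ((i, (refRuns1 cs (i + 1) ((c.toNat : Int) - 48)).1.1,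
             (refRuns1 cs (i + 1) ((c.toNat : Int) - 48)).1.2) :
           Int × Int × Int) :: (refRuns1 cs (i + 1) ((c.toNat : Int) - 48)).2
      else refRuns cs (i + 1)
end

lemma refRuns1_nil (i v : Int) : refRuns1 [] i v = ((i - 1, v), []) := by rw [refRuns1]

lemma refRuns1_cons_digit {c : Char} (cs : List Char) (i v : Int) (h : PySem.Chars.isdigit c = true) :
    refRuns1 (c :: cs) i v = refRuns1 cs (i + 1) (v * 10 + ((c.toNat : Int) - 48)) := by
  rw [refRuns1, if_pos h]

lemma refRuns1_cons_nondigit {c : Char} (cs : List Char) (i v : Int) (h : ¬ PySem.Chars.isdigit c = true) :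
    refRuns1 (c :: cs) i v = ((i - 1, v), refRuns cs (i + 1)) := by
  rw [refRuns1, if_neg h]

lemma refRuns_nil (i : Int) : refRuns [] i = [] := by rw [refRuns]

lemma refRuns_cons_digit {c : Char} (cs : List Char) (i : Int) (h : PySem.Chars.isdigit c = true) :
    refRuns (c :: cs) i =
      (i, (refRuns1 cs (i + 1) ((c.toNat : Int) - 48)).1.1,
          (refRuns1 cs (i + 1) ((c.toNat : Int) - 48)).1.2) ::
        (refRuns1 cs (i + 1) ((c.toNat : Int) - 48)).2 := by
  rw [refRuns, if_pos h]

lemma refRuns_cons_nondigit {c : Char} (cs : List Char) (i : Int) (h : ¬ PySem.Chars.isdigit c = true) :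
    refRuns (c :: cs) i = refRuns cs (i + 1) := by
  rw [refRuns, if_neg h]

def intRangeGo (s : Int) : Nat → List Int
  | 0 => []
  | n + 1 => s :: intRangeGo (s + 1) n

def intRange (s e : Int) : List Int := intRangeGo s (e + 1 - s).toNat

def runPos (r : Int × Int × Int) : List Int := intRange r.1 r.2.1

def chunk1 (x : Int) : List Int → List Int × List (List Int)
  | [] => ([x], [])
  | y :: ys =>
    let p := chunk1 y ys
    if x + 1 = y then (x :: p.1, p.2) else ([x], p.1 :: p.2)

def chunk : List Int → List (List Int)
  | [] => []
  | x :: xs => (chunk1 x xs).1 :: (chunk1 x xs).2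

def dPos (cs : List Char) (i : Int) : List Int :=
  ((PySem.List.enumerate cs i).filter (fun p => PySem.Chars.isdigit p.2)).map (fun p => p.1)

def strVal (ds : List Char) : Int := pyIntOfDigits ds

def GoodRun (cs : List Char) (r : Int × Int × Int) : Prop :=
  r.1 ≤ r.2.1 ∧ pyGetGearNumber cs (runPos r) = r.2.2

lemma dPos_nil (i : Int) : dPos [] i = [] := rfl

lemma dPos_cons (c : Char) (cs : List Char) (i : Int) :
    dPos (c :: cs) i = if PySem.Chars.isdigit c then i :: dPos cs (i + 1) else dPos cs (i + 1) := by
  simp only [dPos, PySem.List.enumerate_cons, List.filter_cons]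
  split_ifs with h <;> simp_all

lemma mem_dPos_ge (cs : List Char) : ∀ (i x : Int), x ∈ dPos cs i → i ≤ x := by
  induction cs with
  | nil => simp [dPos_nil]
  | cons c cs ih =>
    intro i x hx
    rw [dPos_cons] at hx
    split_ifs at hx with h
    · rcases List.mem_cons.1 hx with h' | h'
      · omega
      · have := ih _ _ h'; omega
    · have := ih _ _ hx; omega

lemma mem_intRangeGo {x : Int} : ∀ (n : Nat) (s : Int), x ∈ intRangeGo s n ↔ s ≤ x ∧ x < s + n := by
  intro n
  induction n with
  | zero => intro s; simp [intRangeGo]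

  | succ m ih =>
    intro s
    simp only [intRangeGo, List.mem_cons, ih (s + 1)]
    omega

lemma mem_intRange {s e x : Int} : x ∈ intRange s e ↔ s ≤ x ∧ x ≤ e := by
  unfold intRange
  rw [mem_intRangeGo]
  omega

lemma intRange_self (s : Int) : intRange s s = [s] := by
  unfold intRange
  rw [show (s + 1 - s).toNat = 1 from by omega]
  rfl

lemma intRange_cons {s e : Int} (h : s ≤ e) : intRange s e = s :: intRange (s + 1) e := by
  unfold intRange
  rw [show (e + 1 - s).toNat = (e + 1 - (s + 1)).toNat + 1 from by omega]
  rfl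

lemma gb_eq (xs : List Int) : ∀ (k x : Int) (cur : List Int),
    pyIdxDigitsGroup (k - x) (x :: cur) (PySem.List.enumerate xs (k + 1)) =
      (cur.reverse ++ (chunk1 x xs).1) :: (chunk1 x xs).2 := by
  induction xs with
  | nil => intro k x cur; simp [pyIdxDigitsGroup, chunk1, PySem.List.enumerate_nil]
  | cons y ys ih =>
    intro k x cur
    rw [PySem.List.enumerate_cons]
    by_cases h : x + 1 = y
    · have hk : (k + 1) - y = k - x := by omega
      simp only [pyIdxDigitsGroup, hk, if_pos]
      have h2 := ih (k + 1) y (x :: cur)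
      rw [hk] at h2
      rw [h2]
      simp [chunk1, h]
    · have hk : ¬ ((k + 1) - y = k - x) := by omega
      simp only [pyIdxDigitsGroup, if_neg hk]
      rw [ih (k + 1) y []]
      simp [chunk1, h]

lemma pyIdxDigits_eq_chunk (cs : List Char) : pyIdxDigits cs = chunk (dPos cs 0) := by
  show (match PySem.List.enumerate (dPos cs 0) 0 with
    | [] => []
    | (i, x) :: rest => pyIdxDigitsGroup (i - x) [x] rest) = chunk (dPos cs 0)
  cases hd : dPos cs 0 with
  | nil => simp [PySem.List.enumerate_nil, chunk]
  | cons x xs =>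
    rw [PySem.List.enumerate_cons]
    have h2 := gb_eq xs 0 x []
    simp only [chunk]
    simpa using h2

lemma refRuns1_fst_ge (cs : List Char) : ∀ (i v : Int), i - 1 ≤ (refRuns1 cs i v).1.1 := by
  induction cs with
  | nil => intro i v; rw [refRuns1_nil]
  | cons c cs ih =>
    intro i v
    by_cases h : PySem.Chars.isdigit c
    · rw [refRuns1_cons_digit cs i v h]
      have := ih (i + 1) (v * 10 + ((c.toNat : Int) - 48))
      omega
    · rw [refRuns1_cons_nondigit cs i v h]

lemma chunk_ref (cs : List Char) :
    (∀ i : Int, chunk (dPos cs i) = (refRuns cs i).map runPos) ∧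
    (∀ i v : Int, chunk1 (i - 1) (dPos cs i) =
      (intRange (i - 1) (refRuns1 cs i v).1.1, ((refRuns1 cs i v).2).map runPos)) := by
  induction cs with
  | nil =>
    constructor
    · intro i; simp [dPos_nil, chunk, refRuns_nil]
    · intro i v; simp [dPos_nil, chunk1, refRuns1_nil, intRange_self]
  | cons c cs ih =>
    constructor
    · intro i
      rw [dPos_cons]
      by_cases h : PySem.Chars.isdigit c
      · rw [if_pos h, refRuns_cons_digit cs i h]
        have h2 := ih.2 (i + 1) ((c.toNat : Int) - 48)
        rw [show (i : Int) + 1 - 1 = i from by ring] at h2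
        simp only [chunk, h2, List.map_cons]
        rfl
      · rw [if_neg h, refRuns_cons_nondigit cs i h]
        exact ih.1 (i + 1)
    · intro i v
      rw [dPos_cons]
      by_cases h : PySem.Chars.isdigit c
      · rw [if_pos h, refRuns1_cons_digit cs i v h]
        have h2 := ih.2 (i + 1) (v * 10 + ((c.toNat : Int) - 48))
        rw [show (i : Int) + 1 - 1 = i from by ring] at h2
        have hge : i ≤ (refRuns1 cs (i + 1) (v * 10 + ((c.toNat : Int) - 48))).1.1 := by
          have := refRuns1_fst_ge cs (i + 1) (v * 10 + ((c.toNat : Int) - 48))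
          omega
        unfold chunk1
        rw [h2, if_pos (show (i - 1) + 1 = i from by ring)]
        rw [intRange_cons (show i - 1 ≤ (refRuns1 cs (i + 1) (v * 10 + ((c.toNat : Int) - 48))).1.1 from by omega)]
        simp [show (i : Int) - 1 + 1 = i from by ring]
      · rw [if_neg h, refRuns1_cons_nondigit cs i v h]
        have h1 := ih.1 (i + 1)
        cases hd : dPos cs (i + 1) with
        | nil =>
          rw [hd] at h1
          simp only [chunk] at h1
          simp [chunk1, intRange_self, ← h1]
        | cons y ys =>
          rw [hd] at h1
          have hy : ¬ ((i - 1) + 1 = y) := by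
            have := mem_dPos_ge cs (i + 1) y (hd ▸ List.mem_cons_self ..)
            omega
          simp only [chunk] at h1
          simp only [chunk1, if_neg hy]
          rw [intRange_self, h1]

-- B-side: the fold plus the final flush computes refRuns
def finB (st : List (Int × Int × Int) × Option Int × Int) (n : Int) : List (Int × Int × Int) :=
  match st.2.1 with
  | some s => st.1 ++ [(s, n - 1, st.2.2)]
  | none => st.1

lemma altStep_digit_none {c : Char} (runs : List (Int × Int × Int)) (val i : Int)
    (h : PySem.Chars.isdigit c = true) :
    altStep (runs, none, val) (i, c) = (runs, some i, 0 * 10 + ((c.toNat : Int) - 48)) := by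
  simp [altStep, h]

lemma altStep_digit_some {c : Char} (runs : List (Int × Int × Int)) (s val i : Int)
    (h : PySem.Chars.isdigit c = true) :
    altStep (runs, some s, val) (i, c) = (runs, some s, val * 10 + ((c.toNat : Int) - 48)) := by
  simp [altStep, h]

lemma altStep_nondigit_none {c : Char} (runs : List (Int × Int × Int)) (val i : Int)
    (h : ¬ PySem.Chars.isdigit c = true) :
    altStep (runs, none, val) (i, c) = (runs, none, val) := by
  simp [altStep, h]

lemma altStep_nondigit_some {c : Char} (runs : List (Int × Int × Int)) (s val i : Int)
    (h : ¬ PySem.Chars.isdigit c = true) :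
    altStep (runs, some s, val) (i, c) = (runs ++ [(s, i - 1, val)], none, val) := by
  simp [altStep, h]

lemma foldB (cs : List Char) :
    (∀ (i : Int) (runs : List (Int × Int × Int)) (val : Int),
      finB ((PySem.List.enumerate cs i).foldl altStep (runs, none, val)) (i + cs.length) =
        runs ++ refRuns cs i) ∧
    (∀ (i s : Int) (runs : List (Int × Int × Int)) (val : Int),
      finB ((PySem.List.enumerate cs i).foldl altStep (runs, some s, val)) (i + cs.length) =
        runs ++ (s, (refRuns1 cs i val).1.1, (refRuns1 cs i val).1.2) :: (refRuns1 cs i val).2) := by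
  induction cs with
  | nil =>
    constructor
    · intro i runs val
      simp [PySem.List.enumerate_nil, finB, refRuns_nil]
    · intro i s runs val
      simp [PySem.List.enumerate_nil, finB, refRuns1_nil]
  | cons c cs ih =>
    have hlen : ∀ i : Int, i + ((c :: cs).length : Int) = (i + 1) + (cs.length : Int) := by
      intro i
      simp only [List.length_cons]
      push_cast
      ring
    constructor
    · intro i runs val
      rw [PySem.List.enumerate_cons, List.foldl_cons, hlen]
      by_cases h : PySem.Chars.isdigit c
      · rw [altStep_digit_none runs val i h, ih.2 (i + 1) i runs (0 * 10 + ((c.toNat : Int) - 48)),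
          refRuns_cons_digit cs i h]
        norm_num
      · rw [altStep_nondigit_none runs val i h, ih.1 (i + 1) runs val,
          refRuns_cons_nondigit cs i h]
    · intro i s runs val
      rw [PySem.List.enumerate_cons, List.foldl_cons, hlen]
      by_cases h : PySem.Chars.isdigit c
      · rw [altStep_digit_some runs s val i h,
          ih.2 (i + 1) s runs (val * 10 + ((c.toNat : Int) - 48)),
          refRuns1_cons_digit cs i val h]
      · rw [altStep_nondigit_some runs s val i h,
          ih.1 (i + 1) (runs ++ [(s, i - 1, val)]) val,
          refRuns1_cons_nondigit cs i val h]
        simp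

lemma altRuns_eq_finB (cs : List Char) :
    altRuns cs = finB ((PySem.List.enumerate cs 0).foldl altStep ([], none, 0)) cs.length := rfl

lemma altRuns_eq_refRuns (cs : List Char) : altRuns cs = refRuns cs 0 := by
  have h := (foldB cs).1 0 [] 0
  rw [zero_add] at h
  rw [altRuns_eq_finB, h]
  simp

-- gathering the characters of a run back out of the full line
lemma gather (ds : List Char) : ∀ (pre tail : List Char) (acc : List Char),
    (intRange (pre.length : Int) ((pre.length : Int) + ds.length - 1)).foldl
      (fun n i => n ++ (match PySem.List.pyGet? (pre ++ ds ++ tail) i with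
        | some c => [c] | none => [])) acc = acc ++ ds := by
  induction ds with
  | nil =>
    intro pre tail acc
    rw [show ((pre.length : Int) + (([] : List Char).length : Int) - 1) = (pre.length : Int) - 1 from by simp]
    unfold intRange
    rw [show ((pre.length : Int) - 1 + 1 - (pre.length : Int)).toNat = 0 from by omega]
    simp [intRangeGo]
  | cons c ds ih =>
    intro pre tail acc
    have hcons : intRange (pre.length : Int) ((pre.length : Int) + ((c :: ds).length : Int) - 1) =
        (pre.length : Int) :: intRange ((pre.length : Int) + 1) ((pre.length : Int) + ((c :: ds).length : Int) - 1) := by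
      apply intRange_cons
      simp only [List.length_cons]
      push_cast
      omega
    rw [hcons, List.foldl_cons]
    have hget : PySem.List.pyGet? (pre ++ (c :: ds) ++ tail) (pre.length : Int) = some c := by
      rw [show pre ++ (c :: ds) ++ tail = pre ++ c :: (ds ++ tail) from by simp]
      exact PySem.List.pyGet?_append_length pre (ds ++ tail) c
    rw [hget]
    have h2 := ih (pre ++ [c]) tail (acc ++ [c])
    rw [show ((pre ++ [c]).length : Int) = (pre.length : Int) + 1 from by simp] at h2
    rw [show pre ++ (c :: ds) ++ tail = (pre ++ [c]) ++ ds ++ tail from by simp,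
      show (pre.length : Int) + ((c :: ds).length : Int) - 1 =
        ((pre.length : Int) + 1) + (ds.length : Int) - 1 from by push_cast [List.length_cons]; ring]
    simpa using h2

lemma strVal_append (ds : List Char) (c : Char) :
    strVal (ds ++ [c]) = strVal ds * 10 + ((c.toNat : Int) - 48) := by
  simp [strVal, pyIntOfDigits, List.foldl_append]

lemma goodRun_of_gather (pre ds tail : List Char) (hds : ds ≠ []) :
    GoodRun (pre ++ ds ++ tail) ((pre.length : Int), (pre.length : Int) + ds.length - 1, strVal ds) := by
  have hlen : 0 < ds.length := List.length_pos_of_ne_nil hds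
  constructor
  · show (pre.length : Int) ≤ (pre.length : Int) + (ds.length : Int) - 1
    omega
  · show pyGetGearNumber (pre ++ ds ++ tail)
      (intRange (pre.length : Int) ((pre.length : Int) + (ds.length : Int) - 1)) = strVal ds
    unfold pyGetGearNumber
    rw [gather ds pre tail []]
    simp [strVal]

lemma goodV (cs : List Char) :
    (∀ (pre : List Char), ∀ r ∈ refRuns cs (pre.length : Int), GoodRun (pre ++ cs) r) ∧
    (∀ (pre ds : List Char), ds ≠ [] →
      GoodRun (pre ++ ds ++ cs)
          ((pre.length : Int),
           (refRuns1 cs ((pre.length : Int) + ds.length) (strVal ds)).1.1,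
           (refRuns1 cs ((pre.length : Int) + ds.length) (strVal ds)).1.2) ∧
      (∀ r ∈ (refRuns1 cs ((pre.length : Int) + ds.length) (strVal ds)).2,
        GoodRun (pre ++ ds ++ cs) r)) := by
  induction cs with
  | nil =>
    constructor
    · intro pre r hr
      rw [refRuns_nil] at hr
      simp at hr
    · intro pre ds hds
      rw [refRuns1_nil]
      constructor
      · have := goodRun_of_gather pre ds [] hds
        simpa using this
      · intro r hr
        simp at hr
  | cons c cs ih =>
    constructor
    · intro pre r hr
      by_cases h : PySem.Chars.isdigit c
      · rw [refRuns_cons_digit cs _ h] at hr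
        have h2 := ih.2 pre [c] (by simp)
        rw [show (pre.length : Int) + (([c] : List Char).length : Int) = (pre.length : Int) + 1 from by simp,
          show strVal [c] = (c.toNat : Int) - 48 from by simp [strVal, pyIntOfDigits],
          show pre ++ [c] ++ cs = pre ++ (c :: cs) from by simp] at h2
        rcases List.mem_cons.1 hr with rfl | hr'
        · exact h2.1
        · exact h2.2 r hr'
      · rw [refRuns_cons_nondigit cs _ h] at hr
        have h1 := ih.1 (pre ++ [c])
        rw [show ((pre ++ [c]).length : Int) = (pre.length : Int) + 1 from by simp,
          show (pre ++ [c]) ++ cs = pre ++ (c :: cs) from by simp] at h1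
        exact h1 r hr
    · intro pre ds hds
      by_cases h : PySem.Chars.isdigit c
      · rw [refRuns1_cons_digit cs _ _ h]
        have h2 := ih.2 pre (ds ++ [c]) (by simp)
        rw [show ((pre.length : Int) + ((ds ++ [c]).length : Int)) = ((pre.length : Int) + (ds.length : Int)) + 1 from by push_cast [List.length_append, List.length_cons, List.length_nil]; ring,
          strVal_append,
          show pre ++ (ds ++ [c]) ++ cs = pre ++ ds ++ (c :: cs) from by simp] at h2
        exact h2
      · rw [refRuns1_cons_nondigit cs _ _ h]
        constructor
        · have := goodRun_of_gather pre ds (c :: cs) hds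
          simpa using this
        · intro r hr
          have h1 := ih.1 (pre ++ ds ++ [c])
          rw [show ((pre ++ ds ++ [c]).length : Int) = ((pre.length : Int) + (ds.length : Int)) + 1 from by push_cast [List.length_append, List.length_cons, List.length_nil]; ring,
            show (pre ++ ds ++ [c]) ++ cs = pre ++ ds ++ (c :: cs) from by simp] at h1
          exact h1 r hr

lemma good_refRuns (cs : List Char) : ∀ r ∈ refRuns cs 0, GoodRun cs r := by
  have := (goodV cs).1 []
  simpa using this

lemma touch {s e g : Int} (h : s ≤ e) :
    ((intRange s e).any (fun x => x == g - 1 || x == g || x == g + 1) = true) ↔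
      (s - 1 ≤ g ∧ g ≤ e + 1) := by
  rw [List.any_eq_true]
  constructor
  · rintro ⟨x, hx, hc⟩
    have hm := mem_intRange.1 hx
    simp only [Bool.or_eq_true, beq_iff_eq] at hc
    omega
  · rintro ⟨h1, h2⟩
    refine ⟨max s (g - 1), mem_intRange.2 (by omega), ?_⟩
    simp only [Bool.or_eq_true, beq_iff_eq]
    omega

lemma inner_eq (cs : List Char) (gearLine lineNumber g : Int) :
    ∀ (runs : List (Int × Int × Int)) (parts : List (String × (Int × Int))),
    (∀ r ∈ runs, GoodRun cs r) →
    (runs.map runPos).foldl (fun parts d =>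
      if d.any (fun x => x == g - 1 || x == g || x == g + 1) then
        parts ++ [(PySem.Int.toStr g ++ "-" ++ PySem.Int.toStr gearLine, (pyGetGearNumber cs d, lineNumber))]
      else parts) parts =
    runs.foldl (fun parts r =>
      if r.1 - 1 ≤ g ∧ g ≤ r.2.1 + 1 then
        parts ++ [(PySem.Int.toStr g ++ "-" ++ PySem.Int.toStr gearLine, (r.2.2, lineNumber))]
      else parts) parts := by
  intro runs
  induction runs with
  | nil => intro parts _; rfl
  | cons r rs ih =>
    intro parts hgood
    have hr := hgood r (List.mem_cons_self ..)
    rw [List.map_cons, List.foldl_cons, List.foldl_cons]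
    have hcond : ((runPos r).any (fun x => x == g - 1 || x == g || x == g + 1) = true) ↔
        (r.1 - 1 ≤ g ∧ g ≤ r.2.1 + 1) := touch hr.1
    by_cases hc : r.1 - 1 ≤ g ∧ g ≤ r.2.1 + 1
    · rw [if_pos (hcond.2 hc), if_pos hc, hr.2]
      exact ih _ (fun r' h' => hgood r' (List.mem_cons_of_mem _ h'))
    · rw [if_neg (fun hh => hc (hcond.1 hh)), if_neg hc]
      exact ih _ (fun r' h' => hgood r' (List.mem_cons_of_mem _ h'))

lemma loop_eq (cs : List Char) (runs : List (Int × Int × Int)) (gearLine lineNumber : Int)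
    (hgood : ∀ r ∈ runs, GoodRun cs r) :
    ∀ (gears : List Int) (parts : List (String × (Int × Int))),
    pyGearLoop cs (runs.map runPos) gearLine lineNumber gears parts =
      altGearLoop runs gearLine lineNumber gears parts := by
  intro gears
  induction gears with
  | nil => intro parts; rfl
  | cons g gs ih =>
    intro parts
    show pyGearLoop cs (runs.map runPos) gearLine lineNumber gs _ =
      altGearLoop runs gearLine lineNumber gs _
    beta_reduce
    rw [inner_eq cs gearLine lineNumber g runs parts hgood]
    exact ih _

lemma digits_eq_map (cs : List Char) : pyIdxDigits cs = (refRuns cs 0).map runPos := by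
  rw [pyIdxDigits_eq_chunk]
  exact (chunk_ref cs).1 0

-- ===== VERDICT (by name: the statement is the Claim_ definition above) =====
theorem validGearPart_spec : Claim_equal_validGearPart := by
  intro line sB sC sA lineNumber _
  unfold Spec_validGearPart
  have hgood := good_refRuns line.toList
  have hA : validGearPart line sB sC sA lineNumber =
      pyGearLoop line.toList (pyIdxDigits line.toList) (lineNumber + 1) lineNumber sA
        (pyGearLoop line.toList (pyIdxDigits line.toList) lineNumber lineNumber sC
          (pyGearLoop line.toList (pyIdxDigits line.toList) (lineNumber - 1) lineNumber sB [])) := rfl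
  have hB : validGearPart_alt line sB sC sA lineNumber =
      altGearLoop (altRuns line.toList) (lineNumber + 1) lineNumber sA
        (altGearLoop (altRuns line.toList) lineNumber lineNumber sC
          (altGearLoop (altRuns line.toList) (lineNumber - 1) lineNumber sB [])) := rfl
  rw [hA, hB, altRuns_eq_refRuns, digits_eq_map]
  rw [loop_eq _ _ _ _ hgood, loop_eq _ _ _ _ hgood, loop_eq _ _ _ _ hgood]
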